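-- pv_equiv track=rewrite | github.com/vbondoo7/rag-agentic-poc | ai_agents/utils.py | extract_vrom
-- ===== SOURCE A (Python) =====
-- def extract_vrom(answer: str) -> str:
--     for size in ["XS", "S", "M", "L", "XL", "XXL"]:
--         if "T-shirt size" in answer and size in answer:
--             return size
--     n_words = len(answer.split())
--     if n_words < 30:
--         return "XS"
--     if n_words < 80:
--         return "S"
--     if n_words < 150:
--         return "M"
--     if n_words < 250:
--         return "L"
--     if n_words < 350:
--         return "XL"
--     return "XXL"
-- ===== SOURCE B (Python) =====
-- def extract_vrom(answer: str) -> str: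
--     labels = ["XS", "S", "M", "L", "XL", "XXL"]
--     if "T-shirt size" in answer:
--         for size in labels:
--             if size in answer:
--                 return size
--     n = len(answer.split())
--     thresholds = [30, 80, 150, 250, 350]
--     lo, hi = 0, len(thresholds)
--     while lo < hi:
--         mid = (lo + hi) // 2
--         if n < thresholds[mid]:
--             hi = mid
--         else:
--             lo = mid + 1
--     return labels[lo]
-- ===== Notes on version B (the rewrite author's own statement) =====
-- stated objective: alternative
-- what changed: The substring-priority check hoists the marker-phrase membership test out of the loop before a first-match scan of the labels, and the ascending if-threshold chain is replaced by a binary search over a precomputed sorted threshold table indexing into the label list.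
import Mathlib
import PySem

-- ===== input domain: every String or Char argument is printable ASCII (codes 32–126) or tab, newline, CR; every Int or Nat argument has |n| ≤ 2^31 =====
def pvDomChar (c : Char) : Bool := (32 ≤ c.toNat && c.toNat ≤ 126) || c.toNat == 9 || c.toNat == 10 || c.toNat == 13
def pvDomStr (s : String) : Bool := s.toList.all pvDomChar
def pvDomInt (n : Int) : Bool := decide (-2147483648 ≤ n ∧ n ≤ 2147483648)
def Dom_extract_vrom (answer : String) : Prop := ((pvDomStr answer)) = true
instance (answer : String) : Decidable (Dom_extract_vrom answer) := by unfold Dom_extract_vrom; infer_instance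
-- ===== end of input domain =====

-- B hoists the 'T-shirt size' test and replaces the if-threshold chain by a binary search
-- over a sorted threshold table; same values, similar cost (objective: alternative).

-- ===== PORT A =====
-- the 'for size in [...]' loop with early return
def extract_vrom_loopA (answer : String) : List String → Option String
  | [] => none
  | size :: rest =>
    if PySem.Str.isIn "T-shirt size" answer && PySem.Str.isIn size answer then some size
    else extract_vrom_loopA answer rest

def extract_vrom (answer : String) : String :=
  match extract_vrom_loopA answer ["XS", "S", "M", "L", "XL", "XXL"] with
  | some size => size
  | none =>
    let n_words : Int := PySem.List.len (PySem.Str.split₀ answer)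
    if n_words < 30 then "XS"
    else if n_words < 80 then "S"
    else if n_words < 150 then "M"
    else if n_words < 250 then "L"
    else if n_words < 350 then "XL"
    else "XXL"

-- ===== PORT B =====
-- the 'while lo < hi' binary search of Source B
-- fuel = hi - lo bounds the iteration count (each step strictly shrinks hi - lo)
def extract_vrom_go (n : Int) (thresholds : List Int) : Nat → Nat → Nat → Nat
  | 0, lo, _hi => lo
  | fuel + 1, lo, hi =>
    if lo < hi then
      let mid := (lo + hi) / 2
      if n < thresholds.getD mid 0 then extract_vrom_go n thresholds fuel lo mid
      else extract_vrom_go n thresholds fuel (mid + 1) hi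
    else lo

def extract_vrom_bsearch (n : Int) (thresholds : List Int) (lo hi : Nat) : Nat :=
  extract_vrom_go n thresholds (hi - lo) lo hi

def extract_vrom_alt (answer : String) : String :=
  let labels := ["XS", "S", "M", "L", "XL", "XXL"]
  let fallback : String :=
    let n : Int := PySem.List.len (PySem.Str.split₀ answer)
    let thresholds : List Int := [30, 80, 150, 250, 350]
    let lo := extract_vrom_bsearch n thresholds 0 thresholds.length
    labels.getD lo "XXL"
  if PySem.Str.isIn "T-shirt size" answer then
    match labels.find? (fun size => PySem.Str.isIn size answer) with
    | some size => size
    | none => fallback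
  else fallback

-- ===== PRECONDITION & SPEC =====
def Spec_extract_vrom (answer : String) (out : String) : Prop := out = extract_vrom_alt answer
instance (answer : String) (out : String) : Decidable (Spec_extract_vrom answer out) := by unfold Spec_extract_vrom; infer_instance

-- ===== CLAIM (what is proved, stated in full; the proofs are below) =====
def Claim_equal_extract_vrom : Prop := ∀ (answer : String), Dom_extract_vrom answer → Spec_extract_vrom answer (extract_vrom answer)

-- ===== LEMMAS AND PROOFS =====

-- the binary search over the concrete table picks the same label as A's if-chain
theorem extract_vrom_bucket_eq (n : Int) :
    (["XS", "S", "M", "L", "XL", "XXL"] : List String).getD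
        (extract_vrom_bsearch n [30, 80, 150, 250, 350] 0 5) "XXL" =
      (if n < 30 then "XS"
       else if n < 80 then "S"
       else if n < 150 then "M"
       else if n < 250 then "L"
       else if n < 350 then "XL"
       else "XXL") := by
  by_cases h30 : n < 30
  · have h80 : n < 80 := by omega
    have h150 : n < 150 := by omega
    simp [extract_vrom_bsearch, extract_vrom_go, h30, h80, h150]
  · by_cases h80 : n < 80
    · have h150 : n < 150 := by omega
      simp [extract_vrom_bsearch, extract_vrom_go, h30, h80, h150]
    · by_cases h150 : n < 150
      · simp [extract_vrom_bsearch, extract_vrom_go, h30, h80, h150]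
      · by_cases h250 : n < 250
        · have h350 : n < 350 := by omega
          simp [extract_vrom_bsearch, extract_vrom_go, h30, h80, h150, h250, h350]
        · by_cases h350 : n < 350
          · simp [extract_vrom_bsearch, extract_vrom_go, h30, h80, h150, h250, h350]
          · simp [extract_vrom_bsearch, extract_vrom_go, h30, h80, h150, h250, h350]

-- when 'T-shirt size' is present, A's loop is B's find?
theorem extract_vrom_loopA_pos (answer : String)
    (h : PySem.Str.isIn "T-shirt size" answer = true) (labels : List String) :
    extract_vrom_loopA answer labels = labels.find? (fun size => PySem.Str.isIn size answer) := by
  induction labels with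
  | nil => rfl
  | cons s rest ih =>
    cases hc : PySem.Str.isIn s answer <;>
      simp only [extract_vrom_loopA, List.find?, h, hc, Bool.true_and, if_pos,
        Bool.and_self, ih]; simp

-- when 'T-shirt size' is absent, A's loop returns none
theorem extract_vrom_loopA_neg (answer : String)
    (h : PySem.Str.isIn "T-shirt size" answer = false) (labels : List String) :
    extract_vrom_loopA answer labels = none := by
  induction labels with
  | nil => rfl
  | cons s rest ih => simp only [extract_vrom_loopA, h, Bool.false_and, ih]; simp

-- ===== VERDICT (by name: the statement is the Claim_ definition above) =====
theorem extract_vrom_spec : Claim_equal_extract_vrom := by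
  intro answer _
  unfold Spec_extract_vrom extract_vrom extract_vrom_alt
  cases hT : PySem.Str.isIn "T-shirt size" answer with
  | false =>
    rw [extract_vrom_loopA_neg answer hT]
    simp only [Bool.false_eq_true, ite_false]
    exact (extract_vrom_bucket_eq _).symm
  | true =>
    rw [extract_vrom_loopA_pos answer hT]
    simp only [ite_true]
    cases hf : (["XS", "S", "M", "L", "XL", "XXL"] : List String).find?
        (fun size => PySem.Str.isIn size answer) with
    | some s => rfl
    | none => exact (extract_vrom_bucket_eq _).symm
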